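-- pv_equiv track=rewrite | github.com/Pavelimg/BFU | TAYAT/L3.py | greybax
-- ===== SOURCE A (Python) =====
-- def greybax(n, string="S"):
--     string = string.replace("S", "0ACB")  # S → AB
--     for _ in range(n - 1):  # A → 0AC
--         string = string.replace("A", "0AC")
--     string = string.replace("A", ".")  # B → 0DC
--     string = string.replace("B", "0DC")  # B → 0DC
--     string = string.replace("C", "1")  # C → 1
--     string = string.replace("D", "0")  # D → 0
--     return string
-- ===== SOURCE B (Python) =====
-- def greybax(n, string="S"):
--     k = max(0, n - 1)
--     a_part = "0" * k + "." + "1" * k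
--     table = {"S": "0" + a_part + "1001", "A": a_part, "B": "001", "C": "1", "D": "0"}
--     return "".join(table.get(c, c) for c in string)
-- ===== Notes on version B (the rewrite author's own statement) =====
-- stated objective: faster
-- what changed: Replaces A's n-1 whole-string replace passes (plus five final passes) by a single pass that maps each input character through a precomputed table built once from n.
import Mathlib
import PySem

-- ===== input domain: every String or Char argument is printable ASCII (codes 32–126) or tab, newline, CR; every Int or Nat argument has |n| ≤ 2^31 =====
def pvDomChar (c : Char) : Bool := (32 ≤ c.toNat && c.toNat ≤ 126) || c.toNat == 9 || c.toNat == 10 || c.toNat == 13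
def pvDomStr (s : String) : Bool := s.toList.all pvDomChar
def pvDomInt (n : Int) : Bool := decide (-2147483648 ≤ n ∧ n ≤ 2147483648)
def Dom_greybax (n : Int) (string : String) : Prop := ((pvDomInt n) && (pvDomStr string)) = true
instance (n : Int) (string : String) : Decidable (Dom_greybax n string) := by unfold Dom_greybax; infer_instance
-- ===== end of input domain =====

-- B replaces A's n-1 whole-string replace passes by one precomputed per-character table applied in a single pass (O(n + |string|) instead of O(n·output)).

-- ===== PORT A =====
def greybax (n : Int) (string : String) : String :=
  let s0 := PySem.Str.replace string "S" "0ACB"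
  let s1 := (PySem.List.pyRange 0 (n - 1) 1).foldl (fun s _ => PySem.Str.replace s "A" "0AC") s0
  let s2 := PySem.Str.replace s1 "A" "."
  let s3 := PySem.Str.replace s2 "B" "0DC"
  let s4 := PySem.Str.replace s3 "C" "1"
  PySem.Str.replace s4 "D" "0"

-- ===== PORT B =====
-- per-character image table ("table.get(c, c)" in Source B)
def greybaxTable (k : Nat) (c : Char) : List Char :=
  let aPart := List.replicate k '0' ++ '.' :: List.replicate k '1'
  if c = 'S' then '0' :: aPart ++ ['1', '0', '0', '1']
  else if c = 'A' then aPart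
  else if c = 'B' then ['0', '0', '1']
  else if c = 'C' then ['1']
  else if c = 'D' then ['0']
  else [c]

def greybax_alt (n : Int) (string : String) : String :=
  String.ofList (string.toList.flatMap (greybaxTable (n - 1).toNat))

-- ===== PRECONDITION & SPEC =====
def Spec_greybax (n : Int) (string : String) (out : String) : Prop := out = greybax_alt n string
instance (n : Int) (string : String) (out : String) : Decidable (Spec_greybax n string out) := by unfold Spec_greybax; infer_instance

-- ===== CLAIM (what is proved, stated in full; the proofs are below) =====
def Claim_equal_greybax : Prop := ∀ (n : Int) (string : String), Dom_greybax n string → Spec_greybax n string (greybax n string)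

-- ===== LEMMAS AND PROOFS =====

-- single-char Python str.replace is a per-character substitution
theorem go_single (c : Char) (new : List Char) :
    ∀ (l acc : List Char) (fuel : Nat), l.length ≤ fuel →
      PySem.Chars.replace.go [c] new fuel l acc
        = acc.reverse ++ l.flatMap (fun x => if x = c then new else [x]) := by
  intro l
  induction l with
  | nil =>
      intro acc fuel _
      cases fuel <;> simp [PySem.Chars.replace.go]
  | cons x t ih =>
      intro acc fuel hle
      cases fuel with
      | zero => simp at hle
      | succ f =>
        rw [PySem.Chars.replace.go]
        by_cases hx : x = c
        · subst hx
          have hp : [x].isPrefixOf (x :: t) = true := by simp [List.isPrefixOf]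
          simp only [hp, if_true, List.length_nil, Nat.zero_add, List.drop_succ_cons,
            List.drop_zero, List.length_cons]
          rw [ih (new.reverse ++ acc) f (by simp at hle; omega)]
          simp
        · have hp : [c].isPrefixOf (x :: t) = false := by
            simp [List.isPrefixOf]
            exact fun h => (hx h.symm).elim
          simp only [hp, Bool.false_eq_true, if_false]
          rw [ih (x :: acc) f (by simp at hle; omega)]
          simp [hx]

theorem replace_single (s : List Char) (c : Char) (new : List Char) :
    PySem.Chars.replace s [c] new = s.flatMap (fun x => if x = c then new else [x]) := by
  rw [PySem.Chars.replace]
  simp only [List.isEmpty_cons, Bool.false_eq_true, if_false]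
  simpa using go_single c new s [] s.length le_rfl

theorem rep_flatMap (k : Nat) (a : Char) (f : Char → List Char) :
    (List.replicate k a).flatMap f = (List.replicate k (f a)).flatten := by
  induction k with
  | zero => simp
  | succ m ih => simp [List.replicate_succ, ih]

theorem flatten_rep_singleton (k : Nat) (b : Char) :
    (List.replicate k ([b] : List Char)).flatten = List.replicate k b := by
  induction k with
  | zero => simp
  | succ m ih => simp [List.replicate_succ, ih]

-- the n-1 replace passes, per character
theorem loop_expand (k : Nat) (cs : List Char) :
    Nat.iterate (fun s : List Char => s.flatMap (fun x => if x = 'A' then ['0','A','C'] else [x])) k cs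
      = cs.flatMap (fun x => if x = 'A' then List.replicate k '0' ++ 'A' :: List.replicate k 'C' else [x]) := by
  induction k with
  | zero =>
      simp only [Function.iterate_zero, id_eq, List.replicate_zero, List.nil_append]
      calc cs = cs.flatMap (fun x => [x]) := (List.flatMap_singleton' cs).symm
        _ = _ := List.flatMap_congr (fun x _ => by split <;> simp_all)
  | succ m ih =>
      rw [Function.iterate_succ_apply', ih, List.flatMap_assoc]
      apply List.flatMap_congr
      intro x _
      by_cases hx : x = 'A'
      · subst hx
        simp [rep_flatMap]
        rw [show ('0' :: 'A' :: 'C' :: List.replicate m 'C' : List Char)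
              = ['0'] ++ 'A' :: 'C' :: List.replicate m 'C' from rfl,
            ← List.append_assoc, ← List.replicate_succ', List.replicate_succ]
        simp
        rw [List.replicate_succ]
      · simp [hx]

theorem foldl_const {α β : Type} (g : α → α) (l : List β) (s : α) :
    l.foldl (fun a _ => g a) s = Nat.iterate g l.length s := by
  induction l generalizing s with
  | nil => simp
  | cons x t ih => simp [List.foldl_cons, ih, Function.iterate_succ_apply]

theorem pyRange_length (m : Int) : (PySem.List.pyRange 0 m 1).length = m.toNat := by
  rw [PySem.List.length_pyRange_one]
  omega

theorem greybax_spec_aux (n : Int) (string : String) :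
    greybax n string = greybax_alt n string := by
  unfold greybax greybax_alt
  apply String.ext
  simp only [PySem.Str.toList_replace]
  have hfold : ∀ (s : String),
      ((PySem.List.pyRange 0 (n - 1) 1).foldl (fun s _ => PySem.Str.replace s "A" "0AC") s).toList
        = Nat.iterate (fun cs : List Char => cs.flatMap (fun x => if x = 'A' then ['0','A','C'] else [x]))
            (n - 1).toNat s.toList := by
    intro s
    rw [foldl_const, pyRange_length]
    generalize (n - 1).toNat = k
    induction k generalizing s with
    | zero => simp
    | succ m ih =>
        rw [Function.iterate_succ_apply, Function.iterate_succ_apply,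
            ih (PySem.Str.replace s "A" "0AC")]
        congr 1
        rw [PySem.Str.toList_replace]
        exact replace_single s.toList 'A' ['0','A','C']
  rw [hfold]
  simp only [PySem.Str.toList_replace]
  rw [show ("S" : String).toList = ['S'] from rfl, show ("A" : String).toList = ['A'] from rfl,
      show ("B" : String).toList = ['B'] from rfl, show ("C" : String).toList = ['C'] from rfl,
      show ("D" : String).toList = ['D'] from rfl,
      show ("0ACB" : String).toList = ['0','A','C','B'] from rfl,
      show ("." : String).toList = ['.'] from rfl,
      show ("0DC" : String).toList = ['0','D','C'] from rfl,
      show ("1" : String).toList = ['1'] from rfl,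
      show ("0" : String).toList = ['0'] from rfl]
  rw [replace_single, replace_single, replace_single, replace_single, replace_single, loop_expand]
  rw [String.toList_ofList]
  rw [List.flatMap_assoc, List.flatMap_assoc, List.flatMap_assoc, List.flatMap_assoc, List.flatMap_assoc]
  apply List.flatMap_congr
  intro x _
  generalize (n - 1).toNat = k
  unfold greybaxTable
  by_cases h1 : x = 'S'
  · subst h1
    simp [rep_flatMap, flatten_rep_singleton]
  · by_cases h2 : x = 'A'
    · subst h2
      simp [h1, rep_flatMap]
    · by_cases h3 : x = 'B'
      · subst h3; simp
      · by_cases h4 : x = 'C'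
        · subst h4; simp
        · by_cases h5 : x = 'D'
          · subst h5; simp
          · simp [h1, h2, h3, h4, h5]

-- ===== VERDICT (by name: the statement is the Claim_ definition above) =====
theorem greybax_spec : Claim_equal_greybax := by
  intro n string _
  unfold Spec_greybax
  exact greybax_spec_aux n string
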